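-- pv_equiv track=rewrite | github.com/automationator/ace3 | saq/modules/file_analysis/archive.py | order_archive_file_list
-- ===== SOURCE A (Python) =====
-- def order_archive_file_list(file_list: list[str]) -> list[str]:
--     """Order the list of file paths by priority of extraction."""
--     # handle edge cases first
--     if not file_list:
--         return []
--
--     # Define extension groups by priority
--     attack_exts = [
--         ".lnk", ".one", ".jnlp", ".iso", ".img", ".vhd", ".vhdx", ".vmdk", ".msi", ".hta", ".chm", ".cpl", ".scr"
--     ]
--     executable_exts = [
--         ".exe", ".dll", ".com", ".bat", ".cmd", ".jar", ".ps1", ".msi", ".sys", ".drv", ".class"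
--     ]
--     script_exts = [
--         ".js", ".jse", ".vbs", ".vbe", ".wsf", ".wsh", ".ps1", ".psm1", ".sh", ".py", ".rb", ".pl", ".php", ".asp", ".aspx"
--     ]
--     office_pdf_exts = [
--         ".doc", ".docx", ".xls", ".xlsx", ".ppt", ".pptx", ".rtf", ".odt", ".ods", ".odp", ".pdf", ".mht", ".mhtml", ".xml"
--     ]
--
--     def get_priority(file_path):
--         lower = file_path.lower()
--         for ext in attack_exts:
--             if lower.endswith(ext):
--                 return 0
--         for ext in executable_exts:
--             if lower.endswith(ext):
--                 return 1
--         for ext in script_exts: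
--             if lower.endswith(ext):
--                 return 2
--         for ext in office_pdf_exts:
--             if lower.endswith(ext):
--                 return 3
--         return 4
--
--     # sort file_list by priority, preserving original order within each group
--     return sorted(file_list, key=get_priority)
-- ===== SOURCE B (Python) =====
-- # One-pass bucket partition into 5 priority groups (stable), replacing the sort.
-- _ATTACK = [
--     ".lnk", ".one", ".jnlp", ".iso", ".img", ".vhd", ".vhdx", ".vmdk", ".msi", ".hta", ".chm", ".cpl", ".scr"
-- ]
-- _EXEC = [
--     ".exe", ".dll", ".com", ".bat", ".cmd", ".jar", ".ps1", ".msi", ".sys", ".drv", ".class"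
-- ]
-- _SCRIPT = [
--     ".js", ".jse", ".vbs", ".vbe", ".wsf", ".wsh", ".ps1", ".psm1", ".sh", ".py", ".rb", ".pl", ".php", ".asp", ".aspx"
-- ]
-- _OFFICE = [
--     ".doc", ".docx", ".xls", ".xlsx", ".ppt", ".pptx", ".rtf", ".odt", ".ods", ".odp", ".pdf", ".mht", ".mhtml", ".xml"
-- ]
-- _EXT_PRIORITY = [(e, p) for p, group in enumerate([_ATTACK, _EXEC, _SCRIPT, _OFFICE]) for e in group]
--
--
-- def order_archive_file_list(file_list: list[str]) -> list[str]:
--     """Order the list of file paths by priority of extraction (bucket partition)."""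
--     buckets = ([], [], [], [], [])
--     for fp in file_list:
--         lower = fp.lower()
--         buckets[next((p for e, p in _EXT_PRIORITY if lower.endswith(e)), 4)].append(fp)
--     return [fp for b in buckets for fp in b]
-- ===== Notes on version B (the rewrite author's own statement) =====
-- stated objective: alternative
-- what changed: Replaces sorted(file_list, key=get_priority) with a single pass that drops each path into one of 5 priority buckets (priority looked up in one flat extension->priority table instead of four sequential group scans) and concatenates the buckets.
import Mathlib
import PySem

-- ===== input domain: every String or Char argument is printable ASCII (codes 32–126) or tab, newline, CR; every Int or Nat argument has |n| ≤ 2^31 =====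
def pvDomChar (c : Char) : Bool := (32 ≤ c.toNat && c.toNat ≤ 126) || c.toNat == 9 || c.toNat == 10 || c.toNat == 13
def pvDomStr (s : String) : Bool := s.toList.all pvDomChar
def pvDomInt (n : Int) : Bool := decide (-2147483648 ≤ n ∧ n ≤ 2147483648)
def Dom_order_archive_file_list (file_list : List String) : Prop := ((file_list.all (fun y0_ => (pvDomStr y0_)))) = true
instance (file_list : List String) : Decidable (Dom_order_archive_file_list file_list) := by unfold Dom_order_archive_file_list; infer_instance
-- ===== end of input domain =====

-- B replaces the stable sort by a one-pass 5-bucket partition (priority from one flat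
-- extension→priority table); same return value, no speed claim measured.

-- ===== PORT A =====
def pvAttackExts : List String :=
  [".lnk", ".one", ".jnlp", ".iso", ".img", ".vhd", ".vhdx", ".vmdk", ".msi", ".hta", ".chm", ".cpl", ".scr"]
def pvExecutableExts : List String :=
  [".exe", ".dll", ".com", ".bat", ".cmd", ".jar", ".ps1", ".msi", ".sys", ".drv", ".class"]
def pvScriptExts : List String :=
  [".js", ".jse", ".vbs", ".vbe", ".wsf", ".wsh", ".ps1", ".psm1", ".sh", ".py", ".rb", ".pl", ".php", ".asp", ".aspx"]
def pvOfficePdfExts : List String :=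
  [".doc", ".docx", ".xls", ".xlsx", ".ppt", ".pptx", ".rtf", ".odt", ".ods", ".odp", ".pdf", ".mht", ".mhtml", ".xml"]

-- 'for ext in exts: if lower.endswith(ext): return …' — scan returning on first hit
def pvAnyEndswith (lower : String) : List String → Bool
  | [] => false
  | e :: rest => if PySem.Str.endswith lower e then true else pvAnyEndswith lower rest

def pvGetPriority (file_path : String) : Int :=
  let lower := PySem.Str.lower file_path
  if pvAnyEndswith lower pvAttackExts then 0
  else if pvAnyEndswith lower pvExecutableExts then 1
  else if pvAnyEndswith lower pvScriptExts then 2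
  else if pvAnyEndswith lower pvOfficePdfExts then 3
  else 4

def order_archive_file_list (file_list : List String) : List String :=
  if file_list = [] then []
  else PySem.List.sorted file_list pvGetPriority

-- ===== PORT B =====
-- the flat extension→priority table _EXT_PRIORITY of Source B
def pvExtPriority : List (String × Int) :=
  pvAttackExts.map (fun e => (e, 0)) ++ pvExecutableExts.map (fun e => (e, 1))
    ++ pvScriptExts.map (fun e => (e, 2)) ++ pvOfficePdfExts.map (fun e => (e, 3))

-- next((p for e, p in _EXT_PRIORITY if lower.endswith(e)), 4)
def pvPriorityB (lower : String) : Int :=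
  (pvExtPriority.findSome? (fun ep => if PySem.Str.endswith lower ep.1 then some ep.2 else none)).getD 4

def order_archive_file_list_alt (file_list : List String) : List String :=
  let bks := file_list.foldl
    (fun (b : List String × List String × List String × List String × List String) fp =>
      let p := pvPriorityB (PySem.Str.lower fp)
      if p = 0 then (b.1 ++ [fp], b.2.1, b.2.2.1, b.2.2.2.1, b.2.2.2.2)
      else if p = 1 then (b.1, b.2.1 ++ [fp], b.2.2.1, b.2.2.2.1, b.2.2.2.2)
      else if p = 2 then (b.1, b.2.1, b.2.2.1 ++ [fp], b.2.2.2.1, b.2.2.2.2)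
      else if p = 3 then (b.1, b.2.1, b.2.2.1, b.2.2.2.1 ++ [fp], b.2.2.2.2)
      else (b.1, b.2.1, b.2.2.1, b.2.2.2.1, b.2.2.2.2 ++ [fp]))
    ([], [], [], [], [])
  bks.1 ++ bks.2.1 ++ bks.2.2.1 ++ bks.2.2.2.1 ++ bks.2.2.2.2

-- ===== PRECONDITION & SPEC =====
def Spec_order_archive_file_list (file_list : List String) (out : List String) : Prop := out = order_archive_file_list_alt file_list
instance (file_list : List String) (out : List String) : Decidable (Spec_order_archive_file_list file_list out) := by unfold Spec_order_archive_file_list; infer_instance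

-- ===== CLAIM (what is proved, stated in full; the proofs are below) =====
def Claim_equal_order_archive_file_list : Prop := ∀ (file_list : List String), Dom_order_archive_file_list file_list → Spec_order_archive_file_list file_list (order_archive_file_list file_list)

-- ===== LEMMAS AND PROOFS =====

-- B's table lookup computes A's priority
lemma pvFindSome_group (lower : String) (l : List String) (p : Int)
    (f : String × Int → Option Int)
    (hf : ∀ ep, f ep = if PySem.Str.endswith lower ep.1 then some ep.2 else none) :
    (l.map (fun e => (e, p))).findSome? f
      = if pvAnyEndswith lower l then some p else none := by
  induction l with
  | nil => simp [pvAnyEndswith]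
  | cons e rest ih =>
    simp only [List.map_cons, List.findSome?_cons, hf, pvAnyEndswith]
    by_cases h : PySem.Chars.endswith lower.toList e.toList = true <;> simp [h, ih]

lemma pvKeyEq (s : String) : pvPriorityB (PySem.Str.lower s) = pvGetPriority s := by
  unfold pvPriorityB pvGetPriority pvExtPriority
  rw [List.findSome?_append, List.findSome?_append, List.findSome?_append]
  rw [pvFindSome_group _ _ _ _ (fun ep => rfl), pvFindSome_group _ _ _ _ (fun ep => rfl),
      pvFindSome_group _ _ _ _ (fun ep => rfl), pvFindSome_group _ _ _ _ (fun ep => rfl)]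
  by_cases h0 : pvAnyEndswith (PySem.Str.lower s) pvAttackExts <;>
  by_cases h1 : pvAnyEndswith (PySem.Str.lower s) pvExecutableExts <;>
  by_cases h2 : pvAnyEndswith (PySem.Str.lower s) pvScriptExts <;>
  by_cases h3 : pvAnyEndswith (PySem.Str.lower s) pvOfficePdfExts <;>
  simp [h0, h1, h2, h3]

lemma pvPriorityCases (s : String) :
    pvGetPriority s = 0 ∨ pvGetPriority s = 1 ∨ pvGetPriority s = 2 ∨
      pvGetPriority s = 3 ∨ pvGetPriority s = 4 := by
  simp only [pvGetPriority]
  split_ifs <;> simp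

-- the i-th bucket of ys
def pvF (i : Int) (ys : List String) : List String :=
  ys.filter (fun s => decide (pvGetPriority s = i))

def pvCat (ys : List String) : List String :=
  pvF 0 ys ++ pvF 1 ys ++ pvF 2 ys ++ pvF 3 ys ++ pvF 4 ys

lemma pvF_mem {i : Int} {ys : List String} {y : String} (h : y ∈ pvF i ys) :
    pvGetPriority y = i := by
  rw [pvF, List.mem_filter] at h
  simpa using h.2

lemma pvF_append (i : Int) (ys : List String) (x : String) :
    pvF i (ys ++ [x]) = pvF i ys ++ (if pvGetPriority x = i then [x] else []) := by
  simp [pvF, List.filter_append]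
  split_ifs with h <;> simp [h]

lemma pvInsertBy_skip {α : Type} (before : α → α → Bool) (x : α) (l1 l2 : List α)
    (h : ∀ y ∈ l1, before x y = false) :
    PySem.List.insertBy before x (l1 ++ l2) = l1 ++ PySem.List.insertBy before x l2 := by
  induction l1 with
  | nil => rfl
  | cons y t ih =>
    simp only [List.cons_append, PySem.List.insertBy, h y (by simp)]
    simp [ih (fun z hz => h z (by simp [hz]))]

lemma pvInsertBy_front {α : Type} (before : α → α → Bool) (x : α) (l : List α)
    (h : ∀ y ∈ l, before x y = true) :
    PySem.List.insertBy before x l = x :: l := by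
  cases l with
  | nil => rfl
  | cons y t => simp [PySem.List.insertBy, h y (by simp)]

set_option maxHeartbeats 2000000 in
lemma pvInsert_step (ys : List String) (x : String) :
    PySem.List.insertBy (fun a b => decide (pvGetPriority a < pvGetPriority b)) x (pvCat ys)
      = pvCat (ys ++ [x]) := by
  unfold pvCat
  rcases pvPriorityCases x with hx | hx | hx | hx | hx
  · -- priority 0: skip bucket 0, insert before the rest
    have hpre : ∀ y ∈ pvF 0 ys,
        (fun a b => decide (pvGetPriority a < pvGetPriority b)) x y = false := by
      intro y hy; simp [hx, pvF_mem hy]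
    have hsuf : ∀ y ∈ pvF 1 ys ++ pvF 2 ys ++ pvF 3 ys ++ pvF 4 ys,
        (fun a b => decide (pvGetPriority a < pvGetPriority b)) x y = true := by
      intro y hy
      simp only [List.mem_append] at hy
      rcases hy with ((hy | hy) | hy) | hy <;> simp [hx, pvF_mem hy]
    rw [show pvF 0 ys ++ pvF 1 ys ++ pvF 2 ys ++ pvF 3 ys ++ pvF 4 ys
          = pvF 0 ys ++ (pvF 1 ys ++ pvF 2 ys ++ pvF 3 ys ++ pvF 4 ys) by simp,
        pvInsertBy_skip _ _ _ _ hpre,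
        pvInsertBy_front _ _ _ hsuf]
    simp [pvF_append, hx]
  · -- priority 1
    have hpre : ∀ y ∈ pvF 0 ys ++ pvF 1 ys,
        (fun a b => decide (pvGetPriority a < pvGetPriority b)) x y = false := by
      intro y hy
      simp only [List.mem_append] at hy
      rcases hy with hy | hy <;> simp [hx, pvF_mem hy]
    have hsuf : ∀ y ∈ pvF 2 ys ++ pvF 3 ys ++ pvF 4 ys,
        (fun a b => decide (pvGetPriority a < pvGetPriority b)) x y = true := by
      intro y hy
      simp only [List.mem_append] at hy
      rcases hy with (hy | hy) | hy <;> simp [hx, pvF_mem hy]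
    rw [show pvF 0 ys ++ pvF 1 ys ++ pvF 2 ys ++ pvF 3 ys ++ pvF 4 ys
          = (pvF 0 ys ++ pvF 1 ys) ++ (pvF 2 ys ++ pvF 3 ys ++ pvF 4 ys) by simp,
        pvInsertBy_skip _ _ _ _ hpre,
        pvInsertBy_front _ _ _ hsuf]
    simp [pvF_append, hx]
  · -- priority 2
    have hpre : ∀ y ∈ pvF 0 ys ++ pvF 1 ys ++ pvF 2 ys,
        (fun a b => decide (pvGetPriority a < pvGetPriority b)) x y = false := by
      intro y hy
      simp only [List.mem_append] at hy
      rcases hy with (hy | hy) | hy <;> simp [hx, pvF_mem hy]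
    have hsuf : ∀ y ∈ pvF 3 ys ++ pvF 4 ys,
        (fun a b => decide (pvGetPriority a < pvGetPriority b)) x y = true := by
      intro y hy
      simp only [List.mem_append] at hy
      rcases hy with hy | hy <;> simp [hx, pvF_mem hy]
    rw [show pvF 0 ys ++ pvF 1 ys ++ pvF 2 ys ++ pvF 3 ys ++ pvF 4 ys
          = (pvF 0 ys ++ pvF 1 ys ++ pvF 2 ys) ++ (pvF 3 ys ++ pvF 4 ys) by simp,
        pvInsertBy_skip _ _ _ _ hpre,
        pvInsertBy_front _ _ _ hsuf]
    simp [pvF_append, hx]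
  · -- priority 3
    have hpre : ∀ y ∈ pvF 0 ys ++ pvF 1 ys ++ pvF 2 ys ++ pvF 3 ys,
        (fun a b => decide (pvGetPriority a < pvGetPriority b)) x y = false := by
      intro y hy
      simp only [List.mem_append] at hy
      rcases hy with ((hy | hy) | hy) | hy <;> simp [hx, pvF_mem hy]
    have hsuf : ∀ y ∈ pvF 4 ys,
        (fun a b => decide (pvGetPriority a < pvGetPriority b)) x y = true := by
      intro y hy; simp [hx, pvF_mem hy]
    rw [show pvF 0 ys ++ pvF 1 ys ++ pvF 2 ys ++ pvF 3 ys ++ pvF 4 ys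
          = (pvF 0 ys ++ pvF 1 ys ++ pvF 2 ys ++ pvF 3 ys) ++ pvF 4 ys by simp,
        pvInsertBy_skip _ _ _ _ hpre,
        pvInsertBy_front _ _ _ hsuf]
    simp [pvF_append, hx]
  · -- priority 4: everything is skipped, x lands at the very end
    have hpre : ∀ y ∈ pvF 0 ys ++ pvF 1 ys ++ pvF 2 ys ++ pvF 3 ys ++ pvF 4 ys,
        (fun a b => decide (pvGetPriority a < pvGetPriority b)) x y = false := by
      intro y hy
      simp only [List.mem_append] at hy
      rcases hy with (((hy | hy) | hy) | hy) | hy <;> simp [hx, pvF_mem hy]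
    rw [show pvF 0 ys ++ pvF 1 ys ++ pvF 2 ys ++ pvF 3 ys ++ pvF 4 ys
          = (pvF 0 ys ++ pvF 1 ys ++ pvF 2 ys ++ pvF 3 ys ++ pvF 4 ys) ++ ([] : List String) by simp,
        pvInsertBy_skip _ _ _ _ hpre]
    simp [PySem.List.insertBy, pvF_append, hx]

lemma pvFoldl_insert (xs ys : List String) :
    xs.foldl (fun acc x =>
        PySem.List.insertBy (fun a b => decide (pvGetPriority a < pvGetPriority b)) x acc)
      (pvCat ys) = pvCat (ys ++ xs) := by
  induction xs generalizing ys with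
  | nil => simp
  | cons x t ih =>
    simp only [List.foldl_cons, pvInsert_step]
    rw [ih (ys ++ [x])]
    simp

lemma pvSorted_eq_cat (xs : List String) :
    PySem.List.sorted xs pvGetPriority = pvCat xs := by
  rw [PySem.List.sorted_eq_foldl_insertBy]
  have h := pvFoldl_insert xs []
  simpa [pvCat, pvF] using h

lemma pvF_cons (i : Int) (x : String) (xs : List String) :
    pvF i (x :: xs) = (if pvGetPriority x = i then [x] else []) ++ pvF i xs := by
  simp only [pvF, List.filter_cons]
  split_ifs with h <;> simp_all

lemma pvFoldB (xs : List String)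
    (b : List String × List String × List String × List String × List String) :
    xs.foldl
      (fun (b : List String × List String × List String × List String × List String) fp =>
        let p := pvPriorityB (PySem.Str.lower fp)
        if p = 0 then (b.1 ++ [fp], b.2.1, b.2.2.1, b.2.2.2.1, b.2.2.2.2)
        else if p = 1 then (b.1, b.2.1 ++ [fp], b.2.2.1, b.2.2.2.1, b.2.2.2.2)
        else if p = 2 then (b.1, b.2.1, b.2.2.1 ++ [fp], b.2.2.2.1, b.2.2.2.2)
        else if p = 3 then (b.1, b.2.1, b.2.2.1, b.2.2.2.1 ++ [fp], b.2.2.2.2)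
        else (b.1, b.2.1, b.2.2.1, b.2.2.2.1, b.2.2.2.2 ++ [fp])) b
      = (b.1 ++ pvF 0 xs, b.2.1 ++ pvF 1 xs, b.2.2.1 ++ pvF 2 xs,
         b.2.2.2.1 ++ pvF 3 xs, b.2.2.2.2 ++ pvF 4 xs) := by
  simp only [pvKeyEq]
  induction xs generalizing b with
  | nil => simp [pvF]
  | cons x t ih =>
    simp only [List.foldl_cons]
    rcases pvPriorityCases x with hx | hx | hx | hx | hx <;>
      simp [hx, ih, pvF_cons, List.append_assoc]

-- ===== VERDICT (by name: the statement is the Claim_ definition above) =====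
theorem order_archive_file_list_spec : Claim_equal_order_archive_file_list := by
  intro file_list _
  unfold Spec_order_archive_file_list order_archive_file_list order_archive_file_list_alt
  by_cases h : file_list = []
  · simp [h]
  · simp only [h, pvSorted_eq_cat, pvFoldB]
    simp [pvCat]
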